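-- pv_equiv track=rewrite | github.com/linji106/faceswap | tools/sort/sort.py | _near_split
-- ===== SOURCE A (Python) =====
-- def _near_split(bin_range, num_bins):
--     """ Obtain the split for the given number of bins for the given range
--
--     Parameters
--     ----------
--     bin_range: int
--         The range of data to separate into bins
--     num_bins: int
--         The number of bins to create
--
--     Returns
--     -------
--     list
--         The split dividers for the given number of bins for the given range
--     """
--     quotient, remainder = divmod(bin_range, num_bins)
--     seps = [quotient + 1] * remainder + [quotient] * (num_bins - remainder)
--     uplimit = 0
--     bins = [0]
--     for sep in seps:
--         bins.append(uplimit + sep)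
--         uplimit += sep
--     return bins
-- ===== SOURCE B (Python) =====
-- def _near_split(bin_range, num_bins):
--     """Closed-form bin dividers: divider i is i*quotient plus one extra for
--     each of the first `remainder` bins, i.e. i*quotient + min(i, remainder)."""
--     quotient, remainder = divmod(bin_range, num_bins)
--     return [0] + [i * quotient + min(i, remainder) for i in range(1, num_bins + 1)]
-- ===== Notes on version B (the rewrite author's own statement) =====
-- stated objective: simpler
-- what changed: Replaces the seps list ([quotient+1]*remainder + [quotient]*rest) and the running-sum accumulator loop with a single closed-form comprehension: divider i is i*quotient + min(i, remainder).
import Mathlib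
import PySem

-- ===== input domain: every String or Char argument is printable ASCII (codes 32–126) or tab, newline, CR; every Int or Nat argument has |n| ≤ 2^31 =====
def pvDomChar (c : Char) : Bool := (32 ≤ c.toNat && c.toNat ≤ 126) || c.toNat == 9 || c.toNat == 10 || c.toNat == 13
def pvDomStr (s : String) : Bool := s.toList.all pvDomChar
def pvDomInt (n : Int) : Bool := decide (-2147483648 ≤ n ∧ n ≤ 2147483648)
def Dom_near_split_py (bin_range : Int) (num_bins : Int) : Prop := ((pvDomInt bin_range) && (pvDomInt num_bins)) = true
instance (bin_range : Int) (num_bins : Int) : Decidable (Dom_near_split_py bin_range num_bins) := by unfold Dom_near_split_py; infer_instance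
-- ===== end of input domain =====

-- B replaces A's seps-list + running-sum loop with the closed form i*quotient + min(i, remainder) (objective: simpler).

-- ===== PORT A =====
def near_split_py (bin_range : Int) (num_bins : Int) : List Int :=
  match PySem.Int.divmod? bin_range num_bins with
  | none => []   -- divmod raises ZeroDivisionError here; excluded by Pre_
  | some (quotient, remainder) =>
    -- Python '[x] * n' is [] for n ≤ 0; Int.toNat clamps negatives to 0, matching that exactly
    let seps : List Int :=
      List.replicate remainder.toNat (quotient + 1) ++
      List.replicate (num_bins - remainder).toNat quotient
    (seps.foldl (fun (st : Int × List Int) sep => (st.1 + sep, st.2 ++ [st.1 + sep])) (0, [0])).2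

-- ===== PORT B =====
def near_split_py_alt (bin_range : Int) (num_bins : Int) : List Int :=
  match PySem.Int.divmod? bin_range num_bins with
  | none => []   -- divmod raises ZeroDivisionError here; excluded by Pre_
  | some (quotient, remainder) =>
    [0] ++ (PySem.List.pyRange 1 (num_bins + 1) 1).map (fun i => i * quotient + min i remainder)

-- ===== PRECONDITION & SPEC =====
-- divmod raises ZeroDivisionError when num_bins = 0; A is total otherwise.
def Pre_near_split_py (bin_range : Int) (num_bins : Int) : Prop := num_bins ≠ 0
instance (bin_range : Int) (num_bins : Int) : Decidable (Pre_near_split_py bin_range num_bins) := by unfold Pre_near_split_py; infer_instance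
def pvWitness_near_split_py : Int × Int := (7, 3)

def Spec_near_split_py (bin_range : Int) (num_bins : Int) (out : List Int) : Prop := out = near_split_py_alt bin_range num_bins
instance (bin_range : Int) (num_bins : Int) (out : List Int) : Decidable (Spec_near_split_py bin_range num_bins out) := by unfold Spec_near_split_py; infer_instance

-- ===== CLAIM (what is proved, stated in full; the proofs are below) =====
def Claim_equal_near_split_py : Prop := ∀ (bin_range : Int) (num_bins : Int), Dom_near_split_py bin_range num_bins → Pre_near_split_py bin_range num_bins → Spec_near_split_py bin_range num_bins (near_split_py bin_range num_bins)

-- ===== LEMMAS AND PROOFS =====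

/-- Cumulative sums of `seps` starting from `u` (what A's loop appends). -/
def pvCum (u : Int) : List Int → List Int
  | [] => []
  | s :: rest => (u + s) :: pvCum (u + s) rest

theorem pvCum_fold (seps : List Int) : ∀ (u : Int) (acc : List Int),
    (seps.foldl (fun (st : Int × List Int) sep => (st.1 + sep, st.2 ++ [st.1 + sep])) (u, acc)).2
      = acc ++ pvCum u seps := by
  induction seps with
  | nil => simp [pvCum]
  | cons s rest ih => intro u acc; simp [pvCum, ih]

theorem pvCum_append (xs ys : List Int) : ∀ (u : Int),
    pvCum u (xs ++ ys) = pvCum u xs ++ pvCum (u + xs.sum) ys := by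
  induction xs with
  | nil => simp [pvCum]
  | cons x rest ih => intro u; simp [pvCum, ih]; ring_nf

theorem pvCum_replicate (n : Nat) : ∀ (u x : Int),
    pvCum u (List.replicate n x) = (List.range n).map (fun (i : Nat) => u + ((i : Int) + 1) * x) := by
  induction n with
  | zero => simp [pvCum]
  | succ m ih =>
    intro u x
    rw [List.replicate_succ' , pvCum_append, ih, List.range_succ, List.map_append]
    congr 1
    simp [pvCum, List.sum_replicate]
    ring

-- ===== VERDICT (by name: the statement is the Claim_ definition above) =====
theorem near_split_py_spec : Claim_equal_near_split_py := by
  intro bin_range num_bins _ hpre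
  unfold Spec_near_split_py near_split_py near_split_py_alt
  have hpre' : num_bins ≠ 0 := hpre
  have hdm : PySem.Int.divmod? bin_range num_bins
      = some (PySem.Int.floordiv bin_range num_bins, PySem.Int.mod bin_range num_bins) := by
    simp [PySem.Int.divmod?, PySem.Int.floordiv, PySem.Int.mod, hpre']
  rw [hdm]
  set q := PySem.Int.floordiv bin_range num_bins with hq
  set r := PySem.Int.mod bin_range num_bins with hr
  simp only [pvCum_fold]
  rcases lt_or_gt_of_ne hpre' with hneg | hpos
  · -- num_bins < 0 : seps is empty, pyRange is empty
    have hb := PySem.Int.mod_neg_bounds bin_range hneg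
    have h1 : r.toNat = 0 := by omega
    have h2 : (num_bins - r).toNat = 0 := by omega
    rw [h1, h2, PySem.List.pyRange_one_eq_nil (by omega)]
    simp [pvCum]
  · -- num_bins > 0
    have hr0 : 0 ≤ r := PySem.Int.mod_nonneg bin_range hpos
    have hrlt : r < num_bins := PySem.Int.mod_lt bin_range hpos
    have hcast : ((r.toNat : Int)) = r := Int.toNat_of_nonneg hr0
    rw [pvCum_append, pvCum_replicate, pvCum_replicate, PySem.List.pyRange_one]
    simp only [List.sum_replicate, nsmul_eq_mul]
    have hsplit : (num_bins + 1 - 1).toNat = r.toNat + (num_bins - r).toNat := by omega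
    rw [hsplit, List.range_add, List.map_append, List.map_append, List.map_map, List.map_map, List.map_map]
    refine congrArg₂ (· ++ ·) rfl ?_
    refine congrArg₂ (· ++ ·) ?_ ?_
    · apply List.map_congr_left
      intro i hi
      have hi' : (i : Int) < r := by
        have := List.mem_range.mp hi; omega
      simp only [Function.comp]
      have hmin : min (1 + (i : Int)) r = 1 + i := by omega
      rw [hmin]; ring
    · apply List.map_congr_left
      intro i _
      simp only [Function.comp]
      push_cast [hcast]
      have hmin : min (1 + (r + (i : Int))) r = r := by omega
      rw [hmin]; ring
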